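-- pv_equiv track=rewrite | github.com/armadillica/flamenco | flamenco/server/application/utils.py | frame_range_merge
-- ===== SOURCE A (Python) =====
-- def frame_range_merge(frames_list=None):
--     """Given a frames list, merge them and return them as range of frames.
--
--     :Example:
--
--     >>> frames = [1, 3, 4, 5, 8]
--     >>> frame_range_merge(frames)
--     >>> "1,3-5,8"
--
--     """
--     if not frames_list:
--         return ""
--     ranges = []
--     current_frame = start_frame = prev_frame = frames_list[0]
--     n = len(frames_list)
--     for i in range(1, n):
--         current_frame = frames_list[i]
--         if current_frame == prev_frame + 1:
--             pass
--         else: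
--             if start_frame == prev_frame:
--                 ranges.append(str(start_frame))
--             else:
--                 ranges.append("{0}-{1}".format(start_frame, prev_frame))
--             start_frame = current_frame
--         prev_frame = current_frame
--     if start_frame == current_frame:
--         ranges.append(str(start_frame))
--     else:
--         ranges.append("{0}-{1}".format(start_frame, current_frame))
--     return ",".join(ranges)
-- ===== SOURCE B (Python) =====
-- def frame_range_merge(frames_list=None):
--     if not frames_list:
--         return ""
--     pieces = []
--     n = len(frames_list)
--     i = 0
--     while i < n:
--         # two-pointer: scan forward to the end of the maximal consecutive run
--         j = i + 1
--         while j < n and frames_list[j] == frames_list[j - 1] + 1: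
--             j += 1
--         a, b = frames_list[i], frames_list[j - 1]
--         pieces.append(str(a) if a == b else "{0}-{1}".format(a, b))
--         i = j
--     return ",".join(pieces)
-- ===== Notes on version B (the rewrite author's own statement) =====
-- stated objective: alternative
-- what changed: Two-pointer run extraction: an inner scan finds the end index of each maximal consecutive run and the outer loop jumps run by run, replacing A's element-by-element streaming pass that threads start/prev/current values and emits on break points.
import Mathlib
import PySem

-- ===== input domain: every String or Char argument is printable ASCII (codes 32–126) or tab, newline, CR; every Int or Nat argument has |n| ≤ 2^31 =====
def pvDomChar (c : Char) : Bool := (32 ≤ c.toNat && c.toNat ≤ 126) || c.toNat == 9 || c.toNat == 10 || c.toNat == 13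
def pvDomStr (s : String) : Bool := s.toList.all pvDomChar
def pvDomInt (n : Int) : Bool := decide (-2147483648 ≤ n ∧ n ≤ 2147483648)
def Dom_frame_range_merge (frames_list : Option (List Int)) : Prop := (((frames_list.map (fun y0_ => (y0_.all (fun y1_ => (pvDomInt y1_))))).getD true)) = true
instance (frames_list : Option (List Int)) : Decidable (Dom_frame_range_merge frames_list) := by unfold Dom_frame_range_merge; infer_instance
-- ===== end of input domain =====

-- B replaces A's streaming pass (start/prev state, emit on break) by two-pointer run
-- extraction: an inner scan finds each maximal consecutive run, the outer loop jumps run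
-- by run; same values, same cost.

-- ===== PORT A =====
-- A's emit: str(start) if start == prev else "{0}-{1}".format(start, prev)
def pvFmt (a b : Int) : String :=
  if a = b then PySem.Int.toStr a else PySem.Int.toStr a ++ "-" ++ PySem.Int.toStr b

-- A's loop over range(1, n): frames_list[i] walks the tail; state = (ranges, start_frame, prev_frame, current_frame)
def frame_range_merge (frames_list : Option (List Int)) : String :=
  match frames_list with
  | none => ""
  | some xs =>
    match xs with
    | [] => ""
    | f :: rest =>
      let st : List String × Int × Int × Int :=
        rest.foldl (fun (s : List String × Int × Int × Int) current =>
          let (ranges, start, prev, _) := s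
          if current = prev + 1 then (ranges, start, current, current)
          else (ranges ++ [pvFmt start prev], current, current, current))
          ([], f, f, f)
      match st with
      | (ranges, start, _, current) => PySem.Str.join "," (ranges ++ [pvFmt start current])

-- ===== PORT B =====
-- Source B's inner while: advance while the next element is prev+1; returns (last value of the
-- run, i.e. frames_list[j-1], and the remaining suffix starting at j)
def pvSplitRun (prev : Int) : List Int → Int × List Int
  | [] => (prev, [])
  | c :: rest => if c = prev + 1 then pvSplitRun c rest else (prev, c :: rest)

lemma pvSplitRun_len (prev : Int) (xs : List Int) : (pvSplitRun prev xs).2.length ≤ xs.length := by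
  induction xs generalizing prev with
  | nil => simp [pvSplitRun]
  | cons c rest ih =>
    by_cases h : c = prev + 1
    · subst h
      simp only [pvSplitRun, if_true]
      exact le_trans (ih _) (Nat.le_succ _)
    · simp [pvSplitRun, h]

-- Source B's outer while: one piece per maximal run, then continue at the remainder
def pvPieces (a : Int) (xs : List Int) : List String :=
  match h : pvSplitRun a xs with
  | (b, rest) =>
    (if a = b then PySem.Int.toStr a else PySem.Int.toStr a ++ "-" ++ PySem.Int.toStr b) ::
    (match rest with
     | [] => []
     | r :: rs => pvPieces r rs)
termination_by xs.length
decreasing_by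
  have hl := pvSplitRun_len a xs
  rw [h] at hl
  simp at hl
  omega

def frame_range_merge_alt (frames_list : Option (List Int)) : String :=
  match frames_list with
  | none => ""
  | some [] => ""
  | some (f :: rest) => PySem.Str.join "," (pvPieces f rest)

-- ===== PRECONDITION & SPEC =====
def Spec_frame_range_merge (frames_list : Option (List Int)) (out : String) : Prop := out = frame_range_merge_alt frames_list
instance (frames_list : Option (List Int)) (out : String) : Decidable (Spec_frame_range_merge frames_list out) := by unfold Spec_frame_range_merge; infer_instance

-- ===== CLAIM (what is proved, stated in full; the proofs are below) =====
def Claim_equal_frame_range_merge : Prop := ∀ (frames_list : Option (List Int)), Dom_frame_range_merge frames_list → Spec_frame_range_merge frames_list (frame_range_merge frames_list)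

-- ===== LEMMAS AND PROOFS =====

-- pvPieces generalized to a start value distinct from the scan's prev value
def pvPF (start prev : Int) (xs : List Int) : List String :=
  match pvSplitRun prev xs with
  | (b, rest) =>
    pvFmt start b ::
    (match rest with
     | [] => []
     | r :: rs => pvPieces r rs)

lemma pvPieces_eq_pf (a : Int) (xs : List Int) : pvPieces a xs = pvPF a a xs := by
  rw [pvPieces, pvPF]
  split
  next b rest h =>
    conv_rhs => rw [h]
    cases rest <;> simp [pvFmt]

lemma pvPF_run (start prev c : Int) (rest : List Int) (h : c = prev + 1) :
    pvPF start prev (c :: rest) = pvPF start c rest := by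
  simp [pvPF, pvSplitRun, h]

lemma pvPF_break (start prev c : Int) (rest : List Int) (h : ¬ c = prev + 1) :
    pvPF start prev (c :: rest) = pvFmt start prev :: pvPieces c rest := by
  simp [pvPF, pvSplitRun, h]

-- A's loop (started with cur = prev) followed by the final emit equals ranges ++ B's pieces
lemma pvLoop_eq (rest : List Int) (ranges : List String) (start prev : Int) :
    (let t := rest.foldl (fun (s : List String × Int × Int × Int) current =>
          let (ranges, start, prev, _) := s
          if current = prev + 1 then (ranges, start, current, current)
          else (ranges ++ [pvFmt start prev], current, current, current))
          (ranges, start, prev, prev)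
     t.1 ++ [pvFmt t.2.1 t.2.2.2])
    = ranges ++ pvPF start prev rest := by
  induction rest generalizing ranges start prev with
  | nil => simp [pvPF, pvSplitRun]
  | cons c rest ih =>
    by_cases h : c = prev + 1
    · rw [pvPF_run start prev c rest h]
      simpa [List.foldl_cons, h] using ih ranges start c
    · rw [pvPF_break start prev c rest h, pvPieces_eq_pf]
      simpa [List.foldl_cons, h] using ih (ranges ++ [pvFmt start prev]) c c

-- ===== VERDICT (by name: the statement is the Claim_ definition above) =====
theorem frame_range_merge_spec : Claim_equal_frame_range_merge := by
  intro frames_list _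
  unfold Spec_frame_range_merge
  match frames_list with
  | none => rfl
  | some [] => rfl
  | some (f :: rest) =>
    simp only [frame_range_merge, frame_range_merge_alt]
    rw [pvPieces_eq_pf]
    have := pvLoop_eq rest [] f f
    simp only [List.nil_append] at this
    rw [this]
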